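-- pv_equiv track=rewrite | github.com/Yankovsky/yandex-algos-training | hw3/j_2_improved.py | get_possible_positions
-- ===== SOURCE A (Python) =====
-- def manhattan_distance(pos_a, pos_b):
--     return abs(pos_a[0] - pos_b[0]) + abs(pos_a[1] - pos_b[1])
--
-- def get_possible_positions(pos_a, pos_b, deviation_a, deviation_b):
--     positions = set()
--     for x in range(-deviation_a, deviation_a + 1):
--         abs_x = abs(x)
--         for y in range(-deviation_a + abs_x, deviation_a - abs_x + 1):
--             new_position = (pos_a[0] + x, pos_a[1] + y)
--             if manhattan_distance(new_position, pos_b) <= deviation_b: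
--                 positions.add(new_position)
--
--     return positions
-- ===== SOURCE B (Python) =====
-- def get_possible_positions(pos_a, pos_b, deviation_a, deviation_b):
--     positions = set()
--     for x in range(-deviation_a, deviation_a + 1):
--         r = deviation_b - abs(pos_a[0] + x - pos_b[0])
--         if r < 0:
--             continue
--         h = deviation_a - abs(x)
--         lo = max(-h, pos_b[1] - r - pos_a[1])
--         hi = min(h, pos_b[1] + r - pos_a[1])
--         positions.update((pos_a[0] + x, pos_a[1] + y) for y in range(lo, hi + 1))
--     return positions
-- ===== Notes on version B (the rewrite author's own statement) =====
-- stated objective: alternative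
-- what changed: B replaces A's per-point manhattan-distance test over every lattice point of diamond A with a per-column closed-form intersection of y-intervals: for each x it computes the admissible y-range of both diamonds, intersects the bounds, and adds exactly the points of that range (skipping columns outside diamond B entirely).
import Mathlib
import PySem

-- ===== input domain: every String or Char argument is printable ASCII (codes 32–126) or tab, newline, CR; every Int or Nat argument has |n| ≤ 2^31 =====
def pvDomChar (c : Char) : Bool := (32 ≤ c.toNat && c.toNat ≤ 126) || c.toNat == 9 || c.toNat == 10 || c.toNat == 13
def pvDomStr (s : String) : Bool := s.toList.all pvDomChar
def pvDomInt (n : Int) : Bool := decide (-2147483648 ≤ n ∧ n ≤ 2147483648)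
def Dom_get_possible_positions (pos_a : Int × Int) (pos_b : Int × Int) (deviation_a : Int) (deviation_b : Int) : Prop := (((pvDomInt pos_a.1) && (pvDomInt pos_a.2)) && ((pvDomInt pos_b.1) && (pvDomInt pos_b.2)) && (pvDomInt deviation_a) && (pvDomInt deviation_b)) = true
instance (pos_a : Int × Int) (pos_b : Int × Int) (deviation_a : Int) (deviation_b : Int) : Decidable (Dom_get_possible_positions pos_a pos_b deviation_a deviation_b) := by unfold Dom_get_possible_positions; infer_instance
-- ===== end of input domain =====

-- B computes each column's y-interval in closed form and intersects interval bounds instead of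
-- testing every lattice point of diamond A with manhattan_distance (objective: alternative algorithm).

-- ===== PORT A =====
def manhattan_distance (pos_a : Int × Int) (pos_b : Int × Int) : Int :=
  |pos_a.1 - pos_b.1| + |pos_a.2 - pos_b.2|

def get_possible_positions (pos_a : Int × Int) (pos_b : Int × Int) (deviation_a : Int) (deviation_b : Int) : List (Int × Int) :=
  (PySem.List.pyRange (-deviation_a) (deviation_a + 1) 1).foldl (fun positions x =>
    (PySem.List.pyRange (-deviation_a + |x|) (deviation_a - |x| + 1) 1).foldl (fun positions y =>
      let new_position := (pos_a.1 + x, pos_a.2 + y)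
      if manhattan_distance new_position pos_b ≤ deviation_b then PySem.Set.add positions new_position
      else positions) positions) []

-- ===== PORT B =====
def get_possible_positions_alt (pos_a : Int × Int) (pos_b : Int × Int) (deviation_a : Int) (deviation_b : Int) : List (Int × Int) :=
  (PySem.List.pyRange (-deviation_a) (deviation_a + 1) 1).foldl (fun positions x =>
    let r := deviation_b - |pos_a.1 + x - pos_b.1|
    if r < 0 then positions
    else
      let h := deviation_a - |x|
      let lo := max (-h) (pos_b.2 - r - pos_a.2)
      let hi := min h (pos_b.2 + r - pos_a.2)
      PySem.Set.update positions
        ((PySem.List.pyRange lo (hi + 1) 1).map (fun y => (pos_a.1 + x, pos_a.2 + y)))) []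

-- ===== PRECONDITION & SPEC =====
def Spec_get_possible_positions (pos_a : Int × Int) (pos_b : Int × Int) (deviation_a : Int) (deviation_b : Int) (out : List (Int × Int)) : Prop := out = get_possible_positions_alt pos_a pos_b deviation_a deviation_b
instance (pos_a : Int × Int) (pos_b : Int × Int) (deviation_a : Int) (deviation_b : Int) (out : List (Int × Int)) : Decidable (Spec_get_possible_positions pos_a pos_b deviation_a deviation_b out) := by unfold Spec_get_possible_positions; infer_instance

-- ===== CLAIM (what is proved, stated in full; the proofs are below) =====
def Claim_equal_get_possible_positions : Prop := ∀ (pos_a : Int × Int) (pos_b : Int × Int) (deviation_a : Int) (deviation_b : Int), Dom_get_possible_positions pos_a pos_b deviation_a deviation_b → Spec_get_possible_positions pos_a pos_b deviation_a deviation_b (get_possible_positions pos_a pos_b deviation_a deviation_b)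

-- ===== LEMMAS AND PROOFS =====

-- the column of the intersection at offset x, B's closed form
def colI (pos_a : Int × Int) (pos_b : Int × Int) (deviation_a : Int) (deviation_b : Int) (x : Int) : List (Int × Int) :=
  if deviation_b - |pos_a.1 + x - pos_b.1| < 0 then []
  else
    (PySem.List.pyRange
        (max (-(deviation_a - |x|)) (pos_b.2 - (deviation_b - |pos_a.1 + x - pos_b.1|) - pos_a.2))
        (min (deviation_a - |x|) (pos_b.2 + (deviation_b - |pos_a.1 + x - pos_b.1|) - pos_a.2) + 1) 1).map
      (fun y => (pos_a.1 + x, pos_a.2 + y))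

lemma filter_pyRange_interval (a b c d : Int) :
    (PySem.List.pyRange a b 1).filter (fun y => decide (c ≤ y ∧ y ≤ d))
    = PySem.List.pyRange (max a c) (min b (d + 1)) 1 := by
  apply List.Perm.eq_of_pairwise (fun a b _ _ h1 h2 => absurd h1 (lt_asymm h2))
    (List.Pairwise.filter _ (PySem.List.pairwise_lt_pyRange_one a b))
    (PySem.List.pairwise_lt_pyRange_one _ _)
  rw [List.perm_ext_iff_of_nodup ((PySem.List.nodup_pyRange_one a b).filter _)
      (PySem.List.nodup_pyRange_one _ _)]
  intro y
  simp only [List.mem_filter, PySem.List.mem_pyRange_one, decide_eq_true_eq]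
  omega

lemma innerA (pos_b : Int × Int) (db X S : Int) :
    ∀ (l : List Int) (acc : List (Int × Int)), l.Nodup → (∀ y ∈ l, (X, S + y) ∉ acc) →
    l.foldl (fun positions y =>
        if manhattan_distance (X, S + y) pos_b ≤ db then PySem.Set.add positions (X, S + y)
        else positions) acc
    = acc ++ (l.filter (fun y => decide (manhattan_distance (X, S + y) pos_b ≤ db))).map
        (fun y => (X, S + y)) := by
  intro l
  induction l with
  | nil => intro acc _ _; simp
  | cons y t ih =>
    intro acc hnd hacc
    simp only [List.foldl_cons, List.filter_cons]
    by_cases hc : manhattan_distance (X, S + y) pos_b ≤ db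
    · simp only [if_pos hc, decide_eq_true hc]
      rw [PySem.Set.add_of_not_mem (hacc y (by simp))]
      rw [ih (acc ++ [(X, S + y)]) (List.nodup_cons.mp hnd).2 ?_]
      · rw [List.append_assoc]; rfl
      · intro z hz hmem
        rcases List.mem_append.mp hmem with h | h
        · exact hacc z (by simp [hz]) h
        · simp only [List.mem_singleton, Prod.mk.injEq] at h
          have : z = y := by omega
          exact (List.nodup_cons.mp hnd).1 (this ▸ hz)
    · simp only [if_neg hc, decide_eq_false hc]
      exact ih acc (List.nodup_cons.mp hnd).2 (fun z hz => hacc z (by simp [hz]))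

lemma set_update_append {α : Type} [BEq α] [LawfulBEq α] :
    ∀ (xs acc : List α), xs.Nodup → (∀ v ∈ xs, v ∉ acc) → PySem.Set.update acc xs = acc ++ xs := by
  intro xs
  induction xs with
  | nil => intro acc _ _; simp [PySem.Set.update]
  | cons x t ih =>
    intro acc hnd hdisj
    simp only [PySem.Set.update, List.foldl_cons] at *
    rw [PySem.Set.add_of_not_mem (hdisj x (by simp))]
    rw [ih (acc ++ [x]) (List.nodup_cons.mp hnd).2 ?_]
    · rw [List.append_assoc]; rfl
    · intro v hv hmem
      rcases List.mem_append.mp hmem with h | h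
      · exact hdisj v (by simp [hv]) h
      · simp only [List.mem_singleton] at h
        exact (List.nodup_cons.mp hnd).1 (h ▸ hv)

lemma foldl_flatMap_col (base : Int) (col : Int → List (Int × Int))
    (g : List (Int × Int) → Int → List (Int × Int))
    (hg : ∀ acc x, (∀ q ∈ acc, q.1 ≠ base + x) → g acc x = acc ++ col x)
    (hcol : ∀ x q, q ∈ col x → q.1 = base + x) :
    ∀ (l : List Int), l.Nodup → ∀ (acc : List (Int × Int)),
      (∀ x ∈ l, ∀ q ∈ acc, q.1 ≠ base + x) →
      l.foldl g acc = acc ++ l.flatMap col := by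
  intro l
  induction l with
  | nil => intro _ acc _; simp
  | cons x t ih =>
    intro hnd acc hacc
    simp only [List.foldl_cons, List.flatMap_cons]
    rw [hg acc x (hacc x (by simp))]
    rw [ih (List.nodup_cons.mp hnd).2 (acc ++ col x) ?_]
    · rw [List.append_assoc]
    · intro x' hx' q hq
      rcases List.mem_append.mp hq with h | h
      · exact hacc x' (by simp [hx']) q h
      · have h1 := hcol x q h
        intro h2
        have : x = x' := by omega
        exact (List.nodup_cons.mp hnd).1 (this ▸ hx')

lemma colI_first (pos_a pos_b : Int × Int) (deviation_a deviation_b x : Int) :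
    ∀ q ∈ colI pos_a pos_b deviation_a deviation_b x, q.1 = pos_a.1 + x := by
  intro q hq
  unfold colI at hq
  split at hq
  · simp at hq
  · rcases List.mem_map.mp hq with ⟨y, _, rfl⟩
    rfl

lemma colA_eq (pos_a pos_b : Int × Int) (deviation_a deviation_b x : Int) :
    ((PySem.List.pyRange (-deviation_a + |x|) (deviation_a - |x| + 1) 1).filter
        (fun y => decide (manhattan_distance (pos_a.1 + x, pos_a.2 + y) pos_b ≤ deviation_b))).map
      (fun y => (pos_a.1 + x, pos_a.2 + y))
    = colI pos_a pos_b deviation_a deviation_b x := by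
  unfold colI
  by_cases hr : deviation_b - |pos_a.1 + x - pos_b.1| < 0
  · rw [if_pos hr]
    have hnil : (PySem.List.pyRange (-deviation_a + |x|) (deviation_a - |x| + 1) 1).filter
        (fun y => decide (manhattan_distance (pos_a.1 + x, pos_a.2 + y) pos_b ≤ deviation_b)) = [] := by
      apply List.filter_eq_nil_iff.mpr
      intro y _
      simp only [manhattan_distance, decide_eq_true_eq, not_le]
      have h1 : 0 ≤ |pos_a.2 + y - pos_b.2| := abs_nonneg _
      omega
    rw [hnil]; rfl
  · rw [if_neg hr]
    rw [List.filter_congr (l := PySem.List.pyRange (-deviation_a + |x|) (deviation_a - |x| + 1) 1)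
        (q := fun y => decide (pos_b.2 - (deviation_b - |pos_a.1 + x - pos_b.1|) - pos_a.2 ≤ y ∧
          y ≤ pos_b.2 + (deviation_b - |pos_a.1 + x - pos_b.1|) - pos_a.2)) ?_]
    · rw [filter_pyRange_interval]
      congr 2
      · omega
      · omega
    · intro y _
      simp only [manhattan_distance, decide_eq_decide]
      constructor
      · intro h; constructor <;> [skip; skip] <;>
          (have := abs_le.mp (show |pos_a.2 + y - pos_b.2| ≤ deviation_b - |pos_a.1 + x - pos_b.1| by omega); omega)
      · intro h
        have : |pos_a.2 + y - pos_b.2| ≤ deviation_b - |pos_a.1 + x - pos_b.1| :=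
          abs_le.mpr (by omega)
        omega

lemma portA_eq (pos_a pos_b : Int × Int) (deviation_a deviation_b : Int) :
    get_possible_positions pos_a pos_b deviation_a deviation_b
    = (PySem.List.pyRange (-deviation_a) (deviation_a + 1) 1).flatMap
        (colI pos_a pos_b deviation_a deviation_b) := by
  unfold get_possible_positions
  rw [foldl_flatMap_col pos_a.1 (colI pos_a pos_b deviation_a deviation_b) _ ?_ 
      (colI_first pos_a pos_b deviation_a deviation_b)
      _ (PySem.List.nodup_pyRange_one _ _) [] (by intro _ _ q hq; exact absurd hq (List.not_mem_nil))]
  · rw [List.nil_append]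
  · intro acc x hacc
    show (PySem.List.pyRange (-deviation_a + |x|) (deviation_a - |x| + 1) 1).foldl
      (fun positions y =>
        if manhattan_distance (pos_a.1 + x, pos_a.2 + y) pos_b ≤ deviation_b then
          PySem.Set.add positions (pos_a.1 + x, pos_a.2 + y)
        else positions) acc = _
    rw [innerA pos_b deviation_b (pos_a.1 + x) pos_a.2 _ acc (PySem.List.nodup_pyRange_one _ _)
        (fun y _ hmem => (hacc _ hmem) rfl)]
    rw [colA_eq]

lemma portB_eq (pos_a pos_b : Int × Int) (deviation_a deviation_b : Int) :
    get_possible_positions_alt pos_a pos_b deviation_a deviation_b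
    = (PySem.List.pyRange (-deviation_a) (deviation_a + 1) 1).flatMap
        (colI pos_a pos_b deviation_a deviation_b) := by
  unfold get_possible_positions_alt
  rw [foldl_flatMap_col pos_a.1 (colI pos_a pos_b deviation_a deviation_b) _ ?_ 
      (colI_first pos_a pos_b deviation_a deviation_b)
      _ (PySem.List.nodup_pyRange_one _ _) [] (by intro _ _ q hq; exact absurd hq (List.not_mem_nil))]
  · rw [List.nil_append]
  · intro acc x hacc
    show (if deviation_b - |pos_a.1 + x - pos_b.1| < 0 then acc
      else PySem.Set.update acc
        ((PySem.List.pyRange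
            (max (-(deviation_a - |x|)) (pos_b.2 - (deviation_b - |pos_a.1 + x - pos_b.1|) - pos_a.2))
            (min (deviation_a - |x|) (pos_b.2 + (deviation_b - |pos_a.1 + x - pos_b.1|) - pos_a.2) + 1) 1).map
          (fun y => (pos_a.1 + x, pos_a.2 + y)))) = acc ++ colI pos_a pos_b deviation_a deviation_b x
    unfold colI
    by_cases hr : deviation_b - |pos_a.1 + x - pos_b.1| < 0
    · rw [if_pos hr, if_pos hr, List.append_nil]
    · rw [if_neg hr, if_neg hr]
      apply set_update_append
      · apply List.Nodup.map
        · intro a b hab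
          simp only [Prod.mk.injEq] at hab
          omega
        · exact PySem.List.nodup_pyRange_one _ _
      · intro v hv
        rcases List.mem_map.mp hv with ⟨y, _, rfl⟩
        intro hmem
        exact (hacc _ hmem) rfl

-- ===== VERDICT (by name: the statement is the Claim_ definition above) =====
theorem get_possible_positions_spec : Claim_equal_get_possible_positions := by
  intro pos_a pos_b deviation_a deviation_b _
  unfold Spec_get_possible_positions
  rw [portA_eq, portB_eq]
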